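-- pv_equiv track=rewrite | github.com/alisalaman/ur-agent | ai-agent-app/src/ai_agent/core/agents/personas/payments_ecosystem_rep.py | get_persona_specific_insights
-- ===== SOURCE A (Python) =====
-- from typing import Any
--
-- def get_persona_specific_insights(evidence: list[dict[str, Any]]) -> str:
--     """Get PaymentsEcosystemRep-specific insights from evidence."""
--     insights = []
--
--     # Look for interoperability evidence
--     interoperability_evidence = [
--         e
--         for e in evidence
--         if any(
--             keyword in e.get("content", "").lower()
--             for keyword in [
--                 "interoperability",
--                 "cross-sector",
--                 "integration",
--                 "compatibility",
--             ]
--         )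
--     ]
--
--     if interoperability_evidence:
--         insights.append(
--             f"Interoperability considerations in {len(interoperability_evidence)} pieces of evidence"
--         )
--
--     # Look for competition evidence
--     competition_evidence = [
--         e
--         for e in evidence
--         if any(
--             keyword in e.get("content", "").lower()
--             for keyword in ["competition", "monopoly", "market", "ecosystem"]
--         )
--     ]
--
--     if competition_evidence:
--         insights.append(
--             f"Competition and ecosystem perspectives in {len(competition_evidence)} pieces of evidence"
--         )
--
--     return (
--         "; ".join(insights) if insights else "Limited specific insights available"
--     )
-- ===== SOURCE B (Python) =====
-- def get_persona_specific_insights(evidence: list[dict[str, object]]) -> str: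
--     """Data-driven rewrite: a keyword->category index, a tally dict keyed by
--     category, and a template table rendered at the end."""
--     KEYWORD_CATEGORY = [
--         ("interoperability", "interop"), ("cross-sector", "interop"),
--         ("integration", "interop"), ("compatibility", "interop"),
--         ("competition", "comp"), ("monopoly", "comp"),
--         ("market", "comp"), ("ecosystem", "comp"),
--     ]
--     TEMPLATES = [
--         ("interop", "Interoperability considerations"),
--         ("comp", "Competition and ecosystem perspectives"),
--     ]
--     counts = {"interop": 0, "comp": 0}
--     for e in evidence:
--         content = e.get("content", "").lower()
--         seen = {}
--         for kw, cat in KEYWORD_CATEGORY: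
--             if kw in content:
--                 seen[cat] = True
--         for cat in seen:
--             counts[cat] += 1
--     insights = [f"{label} in {counts[cat]} pieces of evidence"
--                 for cat, label in TEMPLATES if counts[cat]]
--     return "; ".join(insights) if insights else "Limited specific insights available"
-- ===== Notes on version B (the rewrite author's own statement) =====
-- stated objective: alternative
-- what changed: Replaces A's two hard-coded per-category list comprehensions by a data-driven design: a keyword-to-category index folded into a per-element 'seen' dict, one tally dict keyed by category, and a template table rendered at the end.
import Mathlib
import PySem

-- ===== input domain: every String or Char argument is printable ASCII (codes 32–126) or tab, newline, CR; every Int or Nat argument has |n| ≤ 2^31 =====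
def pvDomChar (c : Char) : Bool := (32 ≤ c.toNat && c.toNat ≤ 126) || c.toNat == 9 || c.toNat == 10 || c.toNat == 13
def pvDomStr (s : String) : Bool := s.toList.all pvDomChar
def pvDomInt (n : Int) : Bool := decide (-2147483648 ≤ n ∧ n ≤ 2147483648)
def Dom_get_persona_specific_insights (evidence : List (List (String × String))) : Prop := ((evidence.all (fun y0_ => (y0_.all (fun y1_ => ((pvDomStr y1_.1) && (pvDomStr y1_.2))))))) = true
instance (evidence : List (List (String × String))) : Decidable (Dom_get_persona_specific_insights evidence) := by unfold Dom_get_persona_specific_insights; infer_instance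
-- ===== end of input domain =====

-- B is data-driven instead of A's two per-category comprehensions: one keyword->category
-- index folded into a per-element 'seen' dict, a tally dict keyed by category, and a
-- template table rendered at the end (objective: alternative decomposition, same cost).

-- ===== PORT A =====
def pvInteropKw : List String := ["interoperability", "cross-sector", "integration", "compatibility"]
def pvCompKw : List String := ["competition", "monopoly", "market", "ecosystem"]

def get_persona_specific_insights (evidence : List (List (String × String))) : String :=
  let insights : List String := []
  let interoperability_evidence :=
    evidence.filter (fun e =>
      pvInteropKw.any (fun k => PySem.Str.isIn k (PySem.Str.lower (PySem.Dict.getD (PySem.Dict.mk e) "content" ""))))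
  let insights :=
    if interoperability_evidence ≠ [] then
      insights ++ ["Interoperability considerations in " ++
        PySem.Int.toStr (interoperability_evidence.length : Int) ++ " pieces of evidence"]
    else insights
  let competition_evidence :=
    evidence.filter (fun e =>
      pvCompKw.any (fun k => PySem.Str.isIn k (PySem.Str.lower (PySem.Dict.getD (PySem.Dict.mk e) "content" ""))))
  let insights :=
    if competition_evidence ≠ [] then
      insights ++ ["Competition and ecosystem perspectives in " ++
        PySem.Int.toStr (competition_evidence.length : Int) ++ " pieces of evidence"]
    else insights
  if insights ≠ [] then PySem.Str.join "; " insights else "Limited specific insights available"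

-- ===== PORT B =====
def pvKwCat : List (String × String) :=
  [("interoperability", "interop"), ("cross-sector", "interop"),
   ("integration", "interop"), ("compatibility", "interop"),
   ("competition", "comp"), ("monopoly", "comp"),
   ("market", "comp"), ("ecosystem", "comp")]

def pvTemplates : List (String × String) :=
  [("interop", "Interoperability considerations"),
   ("comp", "Competition and ecosystem perspectives")]

-- the body of B's 'for e in evidence' loop
def pvStepB (counts : PySem.Dict String Int) (e : List (String × String)) : PySem.Dict String Int :=
  let content := PySem.Str.lower (PySem.Dict.getD (PySem.Dict.mk e) "content" "")
  let seen : PySem.Dict String Bool :=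
    pvKwCat.foldl (fun s p => if PySem.Str.isIn p.1 content then s.insert p.2 true else s) PySem.Dict.empty
  seen.keys.foldl (fun c cat => c.modify cat 0 (· + 1)) counts

def get_persona_specific_insights_alt (evidence : List (List (String × String))) : String :=
  let counts : PySem.Dict String Int := PySem.Dict.ofList [("interop", 0), ("comp", 0)]
  let counts := evidence.foldl pvStepB counts
  let insights : List String :=
    pvTemplates.filterMap (fun p =>
      if counts.getD p.1 0 ≠ 0 then
        some (p.2 ++ " in " ++ PySem.Int.toStr (counts.getD p.1 0) ++ " pieces of evidence")
      else none)
  if insights ≠ [] then PySem.Str.join "; " insights else "Limited specific insights available"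

-- ===== PRECONDITION & SPEC =====
def Spec_get_persona_specific_insights (evidence : List (List (String × String))) (out : String) : Prop := out = get_persona_specific_insights_alt evidence
instance (evidence : List (List (String × String))) (out : String) : Decidable (Spec_get_persona_specific_insights evidence out) := by unfold Spec_get_persona_specific_insights; infer_instance

-- ===== CLAIM (what is proved, stated in full; the proofs are below) =====
def Claim_equal_get_persona_specific_insights : Prop := ∀ (evidence : List (List (String × String))), Dom_get_persona_specific_insights evidence → Spec_get_persona_specific_insights evidence (get_persona_specific_insights evidence)

-- ===== LEMMAS AND PROOFS =====

-- Folding one single-category segment of the keyword index either inserts its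
-- category once (some keyword matched) or leaves the dict unchanged.
theorem pvSeg (content : String) (kws : List String) (cat : String) (s : PySem.Dict String Bool) :
    (kws.map (fun k => (k, cat))).foldl
        (fun s p => if PySem.Str.isIn p.1 content then s.insert p.2 true else s) s =
    if kws.any (fun k => PySem.Str.isIn k content) then s.insert cat true else s := by
  induction kws generalizing s with
  | nil => simp
  | cons k rest ih =>
    simp only [List.map_cons, List.foldl_cons, List.any_cons]
    by_cases h : PySem.Str.isIn k content = true
    · rw [if_pos h, ih, PySem.Dict.insert_insert_self, ite_self]
      simp only [h, Bool.true_or]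
      exact (if_pos trivial).symm
    · rw [Bool.not_eq_true] at h
      rw [if_neg (by simp only [Bool.not_eq_true]; exact h), ih]
      simp only [h, Bool.false_or]

-- One step of B's loop on a tally dict of the fixed shape adds the two indicators.
theorem pvStepB_eq (a b : Int) (e : List (String × String)) :
    pvStepB (PySem.Dict.mk [("interop", a), ("comp", b)]) e =
    PySem.Dict.mk [("interop", a + (if pvInteropKw.any (fun k => PySem.Str.isIn k (PySem.Str.lower (PySem.Dict.getD (PySem.Dict.mk e) "content" ""))) then 1 else 0)),
                   ("comp", b + (if pvCompKw.any (fun k => PySem.Str.isIn k (PySem.Str.lower (PySem.Dict.getD (PySem.Dict.mk e) "content" ""))) then 1 else 0))] := by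
  unfold pvStepB
  dsimp only
  rw [show pvKwCat = pvInteropKw.map (fun k => (k, "interop")) ++ pvCompKw.map (fun k => (k, "comp")) from rfl,
      List.foldl_append,
      pvSeg (PySem.Str.lower (PySem.Dict.getD (PySem.Dict.mk e) "content" "")) pvInteropKw "interop" PySem.Dict.empty,
      pvSeg (PySem.Str.lower (PySem.Dict.getD (PySem.Dict.mk e) "content" "")) pvCompKw "comp" _]
  by_cases hbi : (pvInteropKw.any fun k =>
      PySem.Str.isIn k (PySem.Str.lower (PySem.Dict.getD (PySem.Dict.mk e) "content" ""))) = true <;>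
  by_cases hbc : (pvCompKw.any fun k =>
      PySem.Str.isIn k (PySem.Str.lower (PySem.Dict.getD (PySem.Dict.mk e) "content" ""))) = true <;>
    simp_all [pvInteropKw, pvCompKw, PySem.Dict.insert, PySem.Dict.empty, PySem.Dict.keys,
          PySem.Dict.modify, PySem.Dict.getD, PySem.Dict.get?,
          PySem.Dict.contains, List.foldl]

-- B's fold over the evidence computes exactly the two filter lengths of A.
theorem pv_fold_counts (evidence : List (List (String × String))) (a b : Int) :
    evidence.foldl pvStepB (PySem.Dict.mk [("interop", a), ("comp", b)]) =
    PySem.Dict.mk [("interop", a + ((evidence.filter (fun e =>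
        pvInteropKw.any (fun k => PySem.Str.isIn k (PySem.Str.lower (PySem.Dict.getD (PySem.Dict.mk e) "content" ""))))).length : Int)),
      ("comp", b + ((evidence.filter (fun e =>
        pvCompKw.any (fun k => PySem.Str.isIn k (PySem.Str.lower (PySem.Dict.getD (PySem.Dict.mk e) "content" ""))))).length : Int))] := by
  induction evidence generalizing a b with
  | nil => simp
  | cons e rest ih =>
    rw [List.foldl_cons, pvStepB_eq, ih]
    simp only [List.filter_cons]
    split_ifs <;> simp_all <;> omega

-- B's fold from the initial tally dict, with the zero offsets folded away.
theorem pv_fold_counts' (evidence : List (List (String × String))) :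
    evidence.foldl pvStepB (PySem.Dict.ofList [("interop", 0), ("comp", 0)]) =
    PySem.Dict.mk [("interop", ((evidence.filter (fun e =>
        pvInteropKw.any (fun k => PySem.Str.isIn k (PySem.Str.lower (PySem.Dict.getD (PySem.Dict.mk e) "content" ""))))).length : Int)),
      ("comp", ((evidence.filter (fun e =>
        pvCompKw.any (fun k => PySem.Str.isIn k (PySem.Str.lower (PySem.Dict.getD (PySem.Dict.mk e) "content" ""))))).length : Int))] := by
  rw [show (PySem.Dict.ofList [("interop", (0:Int)), ("comp", 0)] : PySem.Dict String Int) =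
        PySem.Dict.mk [("interop", (0:Int)), ("comp", 0)] from rfl, pv_fold_counts]
  simp only [zero_add]

-- ===== VERDICT (by name: the statement is the Claim_ definition above) =====
theorem get_persona_specific_insights_spec : Claim_equal_get_persona_specific_insights := by
  intro evidence _
  show _ = _
  unfold get_persona_specific_insights get_persona_specific_insights_alt
  dsimp only
  rw [pv_fold_counts' evidence]
  set fi := (evidence.filter (fun e =>
    pvInteropKw.any (fun k => PySem.Str.isIn k (PySem.Str.lower (PySem.Dict.getD (PySem.Dict.mk e) "content" ""))))) with hfi
  set fc := (evidence.filter (fun e =>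
    pvCompKw.any (fun k => PySem.Str.isIn k (PySem.Str.lower (PySem.Dict.getD (PySem.Dict.mk e) "content" ""))))) with hfc
  have s1 : ("Interoperability considerations" ++ " in " : String) = "Interoperability considerations in " := by decide
  have s2 : ("Competition and ecosystem perspectives" ++ " in " : String) = "Competition and ecosystem perspectives in " := by decide
  simp only [pvTemplates, List.filterMap, PySem.Dict.getD, PySem.Dict.get?]
  by_cases h1 : fi = [] <;> by_cases h2 : fc = [] <;>
    simp [h1, h2, s1, s2, List.length_eq_zero_iff]
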